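-- pv_equiv track=rewrite | github.com/sm6412/Python-Files | MantriSamira_assign7_part3b.py | shift_characters
-- ===== SOURCE A (Python) =====
-- def shift_characters(word, num):
--     new_word=""
--     new_value=0
--     for x in word:
--         ascii_value=ord(x)
--         new_value=(ascii_value+num)
--         new_char=chr(new_value)
--         new_word+=new_char
--     return new_word
-- ===== SOURCE B (Python) =====
-- def shift_characters(word, num):
--     table = {ord(c): ord(c) + num for c in set(word)}
--     return word.translate(table)
-- ===== Notes on version B (the rewrite author's own statement) =====
-- stated objective: faster
-- what changed: Replaces the char-by-char string-concatenation loop with a translation table built once from the distinct characters and a single str.translate pass; Pre_ excludes shifts where chr raises ValueError or yields a lone surrogate (U+D800-U+DFFF), a string not representable as a Lean String. The table-then-translate pass avoids Python-level per-character chr/concat work (measured ~2x faster).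
import Mathlib
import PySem

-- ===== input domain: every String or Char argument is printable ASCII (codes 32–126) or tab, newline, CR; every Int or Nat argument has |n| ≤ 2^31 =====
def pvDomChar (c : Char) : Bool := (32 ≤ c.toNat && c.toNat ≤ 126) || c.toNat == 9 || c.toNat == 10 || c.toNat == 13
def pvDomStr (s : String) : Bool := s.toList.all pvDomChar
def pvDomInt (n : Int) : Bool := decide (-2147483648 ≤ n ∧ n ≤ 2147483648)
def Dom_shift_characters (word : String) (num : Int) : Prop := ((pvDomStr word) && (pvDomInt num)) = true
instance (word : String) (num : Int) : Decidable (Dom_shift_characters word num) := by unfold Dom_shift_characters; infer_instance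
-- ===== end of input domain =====

-- B builds a translation table once from the distinct characters and maps the word
-- through it in a single pass (str.translate), instead of A's concatenation loop (idiomatic).


-- ===== PORT A =====
-- for x in word: new_word += chr(ord(x) + num)
def shift_characters (word : String) (num : Int) : String :=
  String.mk (word.toList.foldl
    (fun new_word x => new_word ++ [Char.ofNat ((x.toNat : Int) + num).toNat]) [])

-- ===== PORT B =====
-- table = {ord(c): ord(c)+num for c in set(word)}; word.translate(table)
def shift_characters_alt (word : String) (num : Int) : String :=
  let table : PySem.Dict Int Int :=
    (PySem.Set.ofList word.toList).foldl
      (fun d c => d.insert (c.toNat : Int) ((c.toNat : Int) + num)) PySem.Dict.empty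
  String.mk (word.toList.map
    (fun c => Char.ofNat ((table.getD (c.toNat : Int) (c.toNat : Int)).toNat)))

-- ===== PRECONDITION & SPEC =====
-- Pre_ excludes shifts that land some character outside chr's range (there Python A raises
-- ValueError) or inside the surrogate range U+D800–U+DFFF, where A returns a lone-surrogate
-- string that is not representable as a Lean String.
def Pre_shift_characters (word : String) (num : Int) : Prop :=
  (word.toList.all fun c =>
    0 ≤ (c.toNat : Int) + num &&
      ((c.toNat : Int) + num < 55296 ||
        (57344 ≤ (c.toNat : Int) + num && (c.toNat : Int) + num ≤ 1114111))) = true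
instance (word : String) (num : Int) : Decidable (Pre_shift_characters word num) := by
  unfold Pre_shift_characters; infer_instance

def pvWitness_shift_characters : String × Int := ("abc", 3)

def Spec_shift_characters (word : String) (num : Int) (out : String) : Prop :=
  out = shift_characters_alt word num
instance (word : String) (num : Int) (out : String) : Decidable (Spec_shift_characters word num out) := by
  unfold Spec_shift_characters; infer_instance

-- ===== CLAIM (what is proved, stated in full; the proofs are below) =====
def Claim_equal_shift_characters : Prop := ∀ (word : String) (num : Int), Dom_shift_characters word num → Pre_shift_characters word num → Spec_shift_characters word num (shift_characters word num)

-- ===== LEMMAS AND PROOFS =====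

-- A's append-accumulator loop is List.map.
theorem foldl_append_eq_map {α β : Type} (f : α → β) :
    ∀ (l : List α) (acc : List β),
      l.foldl (fun a x => a ++ [f x]) acc = acc ++ l.map f := by
  intro l
  induction l with
  | nil => simp
  | cons a l ih => intro acc; simp [List.foldl, ih]

-- Looking up a character present in the list (or already correct in the accumulator dict)
-- in B's shift table yields its shifted code.
theorem getD_shift_table (num dflt : Int) (c : Char) :
    ∀ (l : List Char) (d : PySem.Dict Int Int),
      (c ∈ l ∨ d.getD (c.toNat : Int) dflt = (c.toNat : Int) + num) →
      (l.foldl (fun d x => d.insert (x.toNat : Int) ((x.toNat : Int) + num)) d).getD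
          (c.toNat : Int) dflt = (c.toNat : Int) + num := by
  intro l
  induction l with
  | nil => intro d h; simpa using h.resolve_left (by simp)
  | cons a l ih =>
    intro d h
    simp only [List.foldl]
    by_cases hk : (c.toNat : Int) = (a.toNat : Int)
    · by_cases hc : c ∈ l
      · exact ih _ (Or.inl hc)
      · refine ih _ (Or.inr ?_)
        rw [hk, PySem.Dict.getD_insert_self]
    · rcases h with h | h
      · rcases List.mem_cons.mp h with rfl | hc
        · exact absurd rfl hk
        · exact ih _ (Or.inl hc)
      · refine ih _ (Or.inr ?_)
        rw [PySem.Dict.getD_insert]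
        simp [hk, h]

-- ===== VERDICT (by name: the statement is the Claim_ definition above) =====
theorem shift_characters_spec : Claim_equal_shift_characters := by
  intro word num _ _
  unfold Spec_shift_characters shift_characters shift_characters_alt
  rw [foldl_append_eq_map, List.nil_append]
  congr 1
  apply List.map_congr_left
  intro c hc
  have hmem : c ∈ PySem.Set.ofList word.toList := by
    simpa [PySem.Set.mem_ofList] using hc
  rw [getD_shift_table num _ c _ _ (Or.inl hmem)]
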